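-- pv_equiv track=rewrite | github.com/stangeqwq/CTF | etjenesten/cybertalent2024/bitswin.py | calculate_heap_counts
-- ===== SOURCE A (Python) =====
-- def calculate_heap_counts(bits_string):
--     count = 0
--     counts = []
--     for b in bits_string:
--         if b == "1":
--             count += 1
--         else:
--             if count > 1:
--                 counts.append(count)
--             count = 0
--     if count > 1:
--         counts.append(count)
--     return counts
-- ===== SOURCE B (Python) =====
-- def calculate_heap_counts(bits_string):
--     # Normalize every non-'1' character to '0', so the string is purely binary,
--     # then let str.split cut out the maximal '1'-runs and filter in a comprehension.
--     normalized = "".join(c if c == "1" else "0" for c in bits_string)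
--     return [len(seg) for seg in normalized.split("0") if len(seg) > 1]
-- ===== Notes on version B (the rewrite author's own statement) =====
-- stated objective: simpler
-- what changed: B normalizes every non-'1' character to '0' and then delegates run extraction to str.split('0') followed by a filtering comprehension, instead of A's single stateful loop with an increment/reset counter and in-loop appends.
import Mathlib
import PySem

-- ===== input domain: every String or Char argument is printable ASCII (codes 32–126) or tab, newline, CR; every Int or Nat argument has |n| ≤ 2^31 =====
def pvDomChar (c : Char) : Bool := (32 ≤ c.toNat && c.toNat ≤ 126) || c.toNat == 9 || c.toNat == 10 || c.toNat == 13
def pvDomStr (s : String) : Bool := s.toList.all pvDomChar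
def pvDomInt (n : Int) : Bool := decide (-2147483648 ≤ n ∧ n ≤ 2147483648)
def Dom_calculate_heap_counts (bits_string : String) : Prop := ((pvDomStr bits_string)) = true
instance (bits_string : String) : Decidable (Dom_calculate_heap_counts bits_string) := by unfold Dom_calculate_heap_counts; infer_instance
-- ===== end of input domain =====

-- B normalizes non-'1' characters to '0' and delegates run extraction to split('0') plus a
-- filtering comprehension, instead of A's single stateful increment/reset counter loop. Same cost.

-- ===== PORT A =====
-- the for-loop of A, over the state (count, counts)
def pvLoopA : List Char → Int × List Int → Int × List Int
  | [], st => st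
  | b :: rest, (count, counts) =>
      pvLoopA rest
        (if b = '1' then (count + 1, counts)
         else (0, if count > 1 then counts ++ [count] else counts))

def calculate_heap_counts (bits_string : String) : List Int :=
  let st := pvLoopA bits_string.toList (0, [])
  if st.1 > 1 then st.2 ++ [st.1] else st.2

-- ===== PORT B =====
-- Source B line by line: the join of the generator is the map over the characters;
-- normalized.split("0") is PySem.Chars.splitOn (sep a single char, nonempty);
-- the comprehension is the filter + map over the segments.
def calculate_heap_counts_alt (bits_string : String) : List Int :=
  ((PySem.Chars.splitOn (bits_string.toList.map (fun c => if c = '1' then c else '0')) ['0']).filter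
      (fun seg => decide (1 < seg.length))).map
    (fun seg => (seg.length : Int))

-- ===== PRECONDITION & SPEC =====
def Spec_calculate_heap_counts (bits_string : String) (out : List Int) : Prop := out = calculate_heap_counts_alt bits_string
instance (bits_string : String) (out : List Int) : Decidable (Spec_calculate_heap_counts bits_string out) := by unfold Spec_calculate_heap_counts; infer_instance

-- ===== CLAIM (what is proved, stated in full; the proofs are below) =====
def Claim_equal_calculate_heap_counts : Prop := ∀ (bits_string : String), Dom_calculate_heap_counts bits_string → Spec_calculate_heap_counts bits_string (calculate_heap_counts bits_string)

-- ===== LEMMAS AND PROOFS =====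

lemma pvModifyHead_id {a : Type} (l : List a) : l.modifyHead (fun x => x) = l := by
  cases l <;> simp

-- splitting a list at a single separator character, direct recursion
def pvSplitZ (z : Char) : List Char → List (List Char)
  | [] => [[]]
  | c :: cs => if c = z then [] :: pvSplitZ z cs else (pvSplitZ z cs).modifyHead (c :: ·)

lemma pvSplitZ_ne_nil (z : Char) (l : List Char) : pvSplitZ z l ≠ [] := by
  cases l with
  | nil => simp [pvSplitZ]
  | cons c cs =>
    rw [pvSplitZ]
    split_ifs
    · simp
    · cases h : pvSplitZ z cs with
      | nil => exact absurd h (pvSplitZ_ne_nil z cs)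
      | cons a t => simp

lemma pvSplitOn_go_spec (z : Char) (l : List Char) : ∀ (fuel : Nat) (cur : List Char) (acc : List (List Char)),
    l.length ≤ fuel →
    PySem.Chars.splitOn.go [z] fuel l cur acc
      = acc.reverse ++ (pvSplitZ z l).modifyHead (cur.reverse ++ ·) := by
  induction l with
  | nil =>
    intro fuel cur acc _
    cases fuel <;> simp [PySem.Chars.splitOn.go, pvSplitZ]
  | cons c rest ih =>
    intro fuel cur acc hf
    cases fuel with
    | zero => simp at hf
    | succ f =>
      rw [PySem.Chars.splitOn.go]
      by_cases hc : c = z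
      · have hpre : List.isPrefixOf [z] (c :: rest) = true := by
          simp [List.isPrefixOf, hc]
        rw [if_pos hpre]
        have := ih f [] (cur.reverse :: acc) (by simpa using Nat.lt_succ_iff.mp (by simpa using hf))
        simp only [List.length_cons] at hf
        rw [show List.drop (List.length [z]) (c :: rest) = rest by simp]
        rw [ih f [] (cur.reverse :: acc) (by omega)]
        rw [pvSplitZ, if_pos hc]
        simp [pvModifyHead_id]
      · have hpre : List.isPrefixOf [z] (c :: rest) = false := by
          simp [List.isPrefixOf]; exact fun h => absurd h.symm hc
        rw [if_neg (by simp [hpre])]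
        simp only [List.length_cons] at hf
        rw [ih f (c :: cur) acc (by omega)]
        rw [pvSplitZ, if_neg hc]
        cases h : pvSplitZ z rest with
        | nil => exact absurd h (pvSplitZ_ne_nil z rest)
        | cons a t => simp

lemma pvSplitOn_eq (z : Char) (l : List Char) :
    PySem.Chars.splitOn l [z] = pvSplitZ z l := by
  rw [PySem.Chars.splitOn, pvSplitOn_go_spec z l (l.length + 1) [] [] (by omega)]
  cases h : pvSplitZ z l with
  | nil => exact absurd h (pvSplitZ_ne_nil z l)
  | cons a t => simp

-- run lengths of l when a pending run of n '1's is already open (characterises A's loop)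
def pvRlen : List Char → Nat → List Nat
  | [], n => if n = 0 then [] else [n]
  | c :: cs, n =>
      if c = '1' then pvRlen cs (n + 1)
      else (if n = 0 then [] else [n]) ++ pvRlen cs 0

def pvFiltMap (r : List Nat) : List Int :=
  (r.filter (fun k => decide (1 < k))).map (fun (k : Nat) => (k : Int))

lemma pvFiltMap_append (r s : List Nat) : pvFiltMap (r ++ s) = pvFiltMap r ++ pvFiltMap s := by
  simp [pvFiltMap]

lemma pvLoop_main (l : List Char) : ∀ (n : Nat) (counts : List Int),
    (let st := pvLoopA l ((n : Int), counts); if st.1 > 1 then st.2 ++ [st.1] else st.2)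
      = counts ++ pvFiltMap (pvRlen l n) := by
  induction l with
  | nil =>
    intro n counts
    simp only [pvLoopA, pvRlen, pvFiltMap]
    by_cases h : 1 < n
    · rw [if_pos (by exact_mod_cast h), if_neg (show ¬ n = 0 by omega)]
      simp [h]
    · rw [if_neg (by exact_mod_cast h)]
      rcases Nat.lt_or_ge n 1 with h1 | h1
      · simp [Nat.lt_one_iff.mp h1]
      · have : n = 1 := by omega
        simp [this]
  | cons c cs ih =>
    intro n counts
    by_cases hc : c = '1'
    · rw [pvLoopA, if_pos hc]
      have : (n : Int) + 1 = ((n + 1 : Nat) : Int) := by push_cast; ring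
      rw [this, ih (n + 1) counts, pvRlen, if_pos hc]
    · rw [pvLoopA, if_neg hc]
      rw [show ((0 : Int)) = ((0 : Nat) : Int) by norm_num]
      rw [ih 0 _, pvRlen, if_neg hc, pvFiltMap_append, ← List.append_assoc]
      congr 1
      by_cases h : 1 < n
      · rw [if_pos (by exact_mod_cast h), if_neg (show ¬ n = 0 by omega)]
        simp [pvFiltMap, h]
      · rw [if_neg (by exact_mod_cast h)]
        rcases Nat.lt_or_ge n 1 with h1 | h1
        · simp [Nat.lt_one_iff.mp h1, pvFiltMap]
        · have : n = 1 := by omega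
          simp [this, pvFiltMap]

-- A's run lengths (zeros dropped) vs B's split segments (zero-length segments kept):
-- with a pending run of n, pvRlen is the segment-length list with n added to the head
-- and the zero lengths filtered away.
lemma pvRlen_eq_split (l : List Char) : ∀ n : Nat,
    pvRlen l n
      = (((pvSplitZ '0' (l.map (fun c => if c = '1' then c else '0'))).map List.length).modifyHead
          (· + n)).filter (fun k => decide (k ≠ 0)) := by
  induction l with
  | nil =>
    intro n
    by_cases h : n = 0 <;> simp [pvRlen, pvSplitZ, h]
  | cons c cs ih =>
    intro n
    by_cases hc : c = '1'
    · rw [pvRlen, if_pos hc]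
      simp only [List.map_cons, hc]
      rw [pvSplitZ, if_neg (by decide)]
      cases h : pvSplitZ '0' (cs.map (fun c => if c = '1' then c else '0')) with
      | nil => exact absurd h (pvSplitZ_ne_nil _ _)
      | cons a t =>
        rw [ih (n + 1), h]
        simp only [List.modifyHead_cons, List.map_cons, List.length_cons]
        congr 2
        omega
    · rw [pvRlen, if_neg hc]
      simp only [List.map_cons, if_neg hc]
      rw [pvSplitZ, if_pos rfl]
      simp only [List.map_cons, List.modifyHead_cons, List.length_nil, Nat.zero_add,
        List.filter_cons]
      by_cases h : n = 0
      · rw [ih 0]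
        simp [h, pvModifyHead_id]
      · rw [ih 0]
        simp [h, pvModifyHead_id]

lemma pvFiltMap_filter_ne_zero (r : List Nat) :
    pvFiltMap (r.filter (fun k => decide (k ≠ 0))) = pvFiltMap r := by
  induction r with
  | nil => rfl
  | cons k r ih =>
    by_cases h : k = 0
    · simp [pvFiltMap, h] at ih ⊢
      exact ih
    · by_cases h1 : 1 < k <;> simp [pvFiltMap, h, h1] at ih ⊢ <;> exact ih

lemma pvFiltMap_eq_filter_map (r : List Nat) :
    pvFiltMap r = (r.filter (fun k => decide (1 < k))).map (fun (k : Nat) => (k : Int)) := rfl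

-- ===== VERDICT (by name: the statement is the Claim_ definition above) =====
theorem calculate_heap_counts_spec : Claim_equal_calculate_heap_counts := by
  intro s _
  show calculate_heap_counts s = calculate_heap_counts_alt s
  unfold calculate_heap_counts calculate_heap_counts_alt
  rw [show ((0 : Int)) = ((0 : Nat) : Int) by norm_num]
  rw [pvLoop_main s.toList 0 []]
  rw [pvSplitOn_eq]
  have hmod : (((pvSplitZ '0' (s.toList.map (fun c => if c = '1' then c else '0'))).map
      List.length).modifyHead (· + 0)) = ((pvSplitZ '0' (s.toList.map (fun c => if c = '1' then c else '0'))).map List.length) := by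
    cases h : (pvSplitZ '0' (s.toList.map (fun c => if c = '1' then c else '0'))).map List.length with
    | nil => rfl
    | cons a t => simp
  have := pvRlen_eq_split s.toList 0
  rw [hmod] at this
  rw [this, pvFiltMap_filter_ne_zero, pvFiltMap_eq_filter_map]
  simp [List.filter_map, Function.comp_def]
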